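-- pv_equiv track=rewrite | github.com/yfgao76/MedGemmaNexus | core/parser.py | _json_object_fragments
-- ===== SOURCE A (Python) =====
-- from typing import Any, Dict, List, Optional, Tuple
--
-- def extract_outermost_json_object(text: str) -> Optional[str]:
--     """
--     Extract the first *balanced* JSON object substring from text.
--     Robust against leading/trailing chatter.
--
--     Notes:
--     - Handles nested braces.
--     - Attempts to ignore braces inside JSON strings.
--     """
--     if not text:
--         return None
--
--     s = text
--     start = s.find("{")
--     if start < 0:
--         return None
--
--     depth = 0
--     in_str = False
--     esc = False
--
--     for i in range(start, len(s)):
--         ch = s[i]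
--         if in_str:
--             if esc:
--                 esc = False
--             elif ch == "\\":
--                 esc = True
--             elif ch == '"':
--                 in_str = False
--             continue
--
--         if ch == '"':
--             in_str = True
--             continue
--         if ch == "{":
--             depth += 1
--             continue
--         if ch == "}":
--             depth -= 1
--             if depth == 0:
--                 return s[start : i + 1]
--
--     return None
--
-- def _json_object_fragments(text: str) -> List[str]:
--     """
--     Enumerate balanced JSON object fragments from a text blob.
--     """
--     s = str(text or "")
--     out: List[str] = []
--     seen = set()
--     for i, ch in enumerate(s):
--         if ch != "{":
--             continue
--         frag = extract_outermost_json_object(s[i:])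
--         if not frag:
--             continue
--         key = frag.strip()
--         if not key or key in seen:
--             continue
--         seen.add(key)
--         out.append(key)
--     return out
-- ===== SOURCE B (Python) =====
-- from typing import List
--
-- def _scan_record(s, start, memo):
--     # One string-aware scan from `start` (a '{'): records the matching close
--     # position for EVERY non-string '{' met on the way (None if unclosed).
--     stack = []
--     in_str = False
--     esc = False
--     for k in range(start, len(s)):
--         ch = s[k]
--         if in_str:
--             if esc:
--                 esc = False
--             elif ch == "\\":
--                 esc = True
--             elif ch == '"':
--                 in_str = False
--             continue
--         if ch == '"':
--             in_str = True
--         elif ch == "{":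
--             stack.append(k)
--         elif ch == "}" and stack:
--             memo[stack.pop()] = k
--             if not stack:
--                 return
--     for k in stack:
--         memo[k] = None
--
-- def _json_object_fragments(text: str) -> List[str]:
--     s = str(text or "")
--     memo = {}
--     out: List[str] = []
--     seen = set()
--     for i, ch in enumerate(s):
--         if ch != "{":
--             continue
--         if i not in memo:
--             _scan_record(s, i, memo)
--         j = memo[i]
--         if j is None:
--             continue
--         key = s[i : j + 1].strip()
--         if not key or key in seen:
--             continue
--         seen.add(key)
--         out.append(key)
--     return out
-- ===== Notes on version B (the rewrite author's own statement) =====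
-- stated objective: alternative
-- what changed: Instead of restarting a fresh balanced-brace scan at every '{' (A), B runs one string-aware scan per unmemoized '{' that pushes open positions on a stack and records the matching close (or None) for every non-string '{' it passes in a memo dict, so each later already-memoized '{' is answered by a single lookup.
import Mathlib
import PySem

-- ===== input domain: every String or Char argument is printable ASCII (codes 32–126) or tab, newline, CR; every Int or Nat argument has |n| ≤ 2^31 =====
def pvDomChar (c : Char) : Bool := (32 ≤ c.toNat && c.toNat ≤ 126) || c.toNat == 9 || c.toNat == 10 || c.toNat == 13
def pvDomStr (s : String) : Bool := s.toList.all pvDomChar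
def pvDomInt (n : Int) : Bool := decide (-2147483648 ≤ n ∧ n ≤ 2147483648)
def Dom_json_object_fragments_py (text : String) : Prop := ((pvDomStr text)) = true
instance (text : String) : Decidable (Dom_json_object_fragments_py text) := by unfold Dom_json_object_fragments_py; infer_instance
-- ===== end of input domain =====

-- B replaces A's per-'{' restarted scans by one memoizing stack scan per unmemoized '{'
-- (objective: alternative algorithm; equal return values proved below).

-- ===== PORT A =====

-- the `for i in range(start, len(s))` loop of extract_outermost_json_object;
-- `rest` are the characters s[i:], iterated with their absolute index i (exact for 0 ≤ start)
def pvExtractLoop (s : List Char) (start : Nat) : List Char → Nat → Int → Bool → Bool → Option String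
  | [], _, _, _, _ => none
  | ch :: rest, i, depth, inStr, esc =>
    if inStr then
      if esc then pvExtractLoop s start rest (i+1) depth inStr false
      else if ch = '\\' then pvExtractLoop s start rest (i+1) depth inStr true
      else if ch = '"' then pvExtractLoop s start rest (i+1) depth false esc
      else pvExtractLoop s start rest (i+1) depth inStr esc
    else if ch = '"' then pvExtractLoop s start rest (i+1) depth true esc
    else if ch = '{' then pvExtractLoop s start rest (i+1) (depth+1) inStr esc
    else if ch = '}' then
      if depth - 1 = 0 then
        some (String.ofList (PySem.List.slice s (some (start : Int)) (some ((i : Int) + 1))))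
      else pvExtractLoop s start rest (i+1) (depth-1) inStr esc
    else pvExtractLoop s start rest (i+1) depth inStr esc

def extract_outermost_json_object (text : String) : Option String :=
  if text = "" then none
  else
    let s := text.toList
    let start := PySem.Str.find text "{"
    if start < 0 then none
    else pvExtractLoop s start.toNat (s.drop start.toNat) start.toNat 0 false false

-- the `for i, ch in enumerate(s)` loop of A (index carried as a Nat counter; s[i:] is List.drop i, exact for 0 ≤ i)
def pvFragLoopA (s : List Char) : List Char → Nat → List String → PySem.Set String → List String
  | [], _, out, _ => out
  | ch :: rest, i, out, seen =>
    if ch ≠ '{' then pvFragLoopA s rest (i+1) out seen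
    else
      match extract_outermost_json_object (String.ofList (List.drop i s)) with
      | none => pvFragLoopA s rest (i+1) out seen
      | some frag =>
        if frag = "" then pvFragLoopA s rest (i+1) out seen  -- `if not frag`
        else
          let key := PySem.Str.strip frag
          if key = "" then pvFragLoopA s rest (i+1) out seen
          else if PySem.Set.contains seen key then pvFragLoopA s rest (i+1) out seen
          else pvFragLoopA s rest (i+1) (out ++ [key]) (PySem.Set.add seen key)

def json_object_fragments_py (text : String) : List String :=
  let s := if text = "" then "" else text   -- s = str(text or "")
  pvFragLoopA s.toList s.toList 0 [] PySem.Set.empty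

-- ===== PORT B =====

-- the `for k in range(start, len(s))` loop of _scan_record (Source B); the Python stack's
-- top is the Lean list's head; the trailing `for k in stack` loop is the foldl in the base case
def pvScanLoop : List Char → Nat → List Nat → Bool → Bool → PySem.Dict Nat (Option Nat) → PySem.Dict Nat (Option Nat)
  | [], _, stack, _, _, memo => stack.reverse.foldl (fun m p => m.insert p none) memo
  | ch :: rest, k, stack, inStr, esc, memo =>
    if inStr then
      if esc then pvScanLoop rest (k+1) stack inStr false memo
      else if ch = '\\' then pvScanLoop rest (k+1) stack inStr true memo
      else if ch = '"' then pvScanLoop rest (k+1) stack false esc memo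
      else pvScanLoop rest (k+1) stack inStr esc memo
    else if ch = '"' then pvScanLoop rest (k+1) stack true esc memo
    else if ch = '{' then pvScanLoop rest (k+1) (k :: stack) inStr esc memo
    else if ch = '}' then
      match stack with
      | [] => pvScanLoop rest (k+1) [] inStr esc memo   -- `ch == "}" and stack` guard fails
      | p :: stack' =>
        let memo' := memo.insert p (some k)
        if stack' = [] then memo'                        -- `if not stack: return`
        else pvScanLoop rest (k+1) stack' inStr esc memo'
    else pvScanLoop rest (k+1) stack inStr esc memo

-- the `for i, ch in enumerate(s)` loop of B (Source B)
def pvFragLoopB (s : List Char) : List Char → Nat → List String → PySem.Set String → PySem.Dict Nat (Option Nat) → List String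
  | [], _, out, _, _ => out
  | ch :: rest, i, out, seen, memo =>
    if ch ≠ '{' then pvFragLoopB s rest (i+1) out seen memo
    else
      let memo := if memo.contains i then memo else pvScanLoop (List.drop i s) i [] false false memo
      match memo.get? i with
      | none => pvFragLoopB s rest (i+1) out seen memo  -- unreachable: the scan always records i (Python: KeyError)
      | some none => pvFragLoopB s rest (i+1) out seen memo
      | some (some j) =>
        let key := PySem.Str.strip (String.ofList (List.take (j + 1 - i) (List.drop i s)))  -- s[i:j+1].strip()
        if key = "" then pvFragLoopB s rest (i+1) out seen memo
        else if PySem.Set.contains seen key then pvFragLoopB s rest (i+1) out seen memo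
        else pvFragLoopB s rest (i+1) (out ++ [key]) (PySem.Set.add seen key) memo

def json_object_fragments_py_alt (text : String) : List String :=
  let s := if text = "" then "" else text   -- s = str(text or "")
  pvFragLoopB s.toList s.toList 0 [] PySem.Set.empty PySem.Dict.empty

-- ===== PRECONDITION & SPEC =====
def Spec_json_object_fragments_py (text : String) (out : List String) : Prop := out = json_object_fragments_py_alt text
instance (text : String) (out : List String) : Decidable (Spec_json_object_fragments_py text out) := by unfold Spec_json_object_fragments_py; infer_instance

-- ===== CLAIM (what is proved, stated in full; the proofs are below) =====
def Claim_equal_json_object_fragments_py : Prop := ∀ (text : String), Dom_json_object_fragments_py text → Spec_json_object_fragments_py text (json_object_fragments_py text)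

-- ===== LEMMAS AND PROOFS =====

-- the common balanced-scan automaton: index of the '}' where `depth` would drop to 0
def pvRun : List Char → Nat → Int → Bool → Bool → Option Nat
  | [], _, _, _, _ => none
  | ch :: rest, i, depth, inStr, esc =>
    if inStr then
      if esc then pvRun rest (i+1) depth inStr false
      else if ch = '\\' then pvRun rest (i+1) depth inStr true
      else if ch = '"' then pvRun rest (i+1) depth false esc
      else pvRun rest (i+1) depth inStr esc
    else if ch = '"' then pvRun rest (i+1) depth true esc
    else if ch = '{' then pvRun rest (i+1) (depth+1) inStr esc
    else if ch = '}' then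
      if depth - 1 = 0 then some i
      else pvRun rest (i+1) (depth-1) inStr esc
    else pvRun rest (i+1) depth inStr esc

-- the close position of the '{' at p (chars after it are s.drop (p+1)), absolute indices
def pvCloseA (s : List Char) (p : Nat) : Option Nat := pvRun (s.drop (p+1)) (p+1) 1 false false

def pvGoodM (s : List Char) (memo : PySem.Dict Nat (Option Nat)) : Prop :=
  ∀ p v, memo.get? p = some v → v = pvCloseA s p

def pvPending (s : List Char) (rest : List Char) (k : Nat) (b e : Bool) (stack : List Nat) : Prop :=
  ∀ r (h : r < stack.length), pvCloseA s stack[r] = pvRun rest k ((r : Int) + 1) b e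

theorem pvExtractLoop_eq_run (s : List Char) (start : Nat) :
    ∀ (rest : List Char) (i : Nat) (d : Int) (b e : Bool),
    pvExtractLoop s start rest i d b e =
      (pvRun rest i d b e).map
        (fun (m : Nat) => String.ofList (PySem.List.slice s (some (start : Int)) (some ((m : Int) + 1)))) := by
  intro rest
  induction rest with
  | nil => intro i d b e; simp [pvExtractLoop, pvRun]
  | cons c cs ih =>
    intro i d b e
    simp only [pvExtractLoop, pvRun]
    split_ifs <;> simp [ih]

theorem pvRun_shift : ∀ (cs : List Char) (i : Nat) (d : Int) (b e : Bool),
    pvRun cs i d b e = (pvRun cs 0 d b e).map (· + i) := by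
  intro cs
  induction cs with
  | nil => intro i d b e; simp [pvRun]
  | cons c cs ih =>
    intro i d b e
    simp only [pvRun]
    split_ifs <;>
      first
        | (rw [ih (i+1), ih 1, Option.map_map]
           apply congrFun
           apply congrArg
           funext m
           simp [Function.comp]
           omega)
        | simp

theorem pvFind_brace (xs : List Char) :
    PySem.Chars.find ('{' :: xs) ['{'] = 0 := by
  have hpre : ['{'] <+: ('{' :: xs) := ⟨xs, rfl⟩
  have h0 : (0 : Int) ≤ PySem.Chars.find ('{' :: xs) ['{'] :=
    (PySem.Chars.find_nonneg_iff _ _).mpr hpre.isInfix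
  have hspec := PySem.Chars.find_spec (s := '{' :: xs) (sub := ['{']) h0
  have ht : (PySem.Chars.find ('{' :: xs) ['{']).toNat = 0 := by
    by_contra hne
    exact hspec.2 0 (by omega) (by simpa using hpre)
  omega

theorem pvExtract_eq (xs : List Char) :
    extract_outermost_json_object (String.ofList ('{' :: xs)) =
      (pvRun xs 1 1 false false).map (fun m => String.ofList (List.take (m + 1) ('{' :: xs))) := by
  have hne : String.ofList ('{' :: xs) ≠ "" := by
    intro h
    have := congrArg String.toList h
    simp at this
  have h1 : extract_outermost_json_object (String.ofList ('{' :: xs)) =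
      pvExtractLoop ('{' :: xs) 0 ('{' :: xs) 0 0 false false := by
    rw [extract_outermost_json_object, if_neg hne]
    simp [pvFind_brace]
  have hstep : pvExtractLoop ('{' :: xs) 0 ('{' :: xs) 0 0 false false
      = pvExtractLoop ('{' :: xs) 0 xs 1 1 false false := by
    rw [pvExtractLoop]
    norm_num
    intro h
    exact absurd h (by decide)
  rw [h1, hstep, pvExtractLoop_eq_run]
  cases h : pvRun xs 1 1 false false with
  | none => simp
  | some m =>
    simp only [Option.map_some]
    congr 1
    rw [show ((m : Int) + 1) = (((m + 1 : Nat)) : Int) by push_cast; ring,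
        PySem.List.slice_natCast]
    simp

theorem pvDrop_succ {s : List Char} {k : Nat} {c : Char} {cs : List Char}
    (h : s.drop k = c :: cs) : s.drop (k + 1) = cs := by
  have h2 : List.drop 1 (List.drop k s) = List.drop 1 (c :: cs) := congrArg _ h
  simpa [List.drop_drop, Nat.add_comm] using h2

theorem pvFoldl_insert_none (s : List Char) :
    ∀ (l : List Nat) (memo : PySem.Dict Nat (Option Nat)),
    (∀ p ∈ l, pvCloseA s p = none) → pvGoodM s memo →
    pvGoodM s (l.foldl (fun m p => m.insert p none) memo) ∧
      ∀ p, (p ∈ l ∨ (memo.get? p).isSome) →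
        ((l.foldl (fun m p => m.insert p none) memo).get? p).isSome := by
  intro l
  induction l with
  | nil =>
    intro memo _ hg
    refine ⟨hg, ?_⟩
    intro p hp
    rcases hp with h | h
    · simp at h
    · simpa using h
  | cons q l ih =>
    intro memo hcl hg
    have hg' : pvGoodM s (memo.insert q none) := by
      intro p v hpv
      rw [PySem.Dict.get?_insert] at hpv
      split_ifs at hpv with hpq
      · cases hpv; rw [hpq]; exact (hcl q (by simp)).symm
      · exact hg p v hpv
    have := ih (memo.insert q none) (fun p hp => hcl p (by simp [hp])) hg'
    refine ⟨this.1, ?_⟩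
    intro p hp
    apply this.2
    rcases hp with h | h
    · rcases List.mem_cons.mp h with h | h
      · right; rw [h, PySem.Dict.get?_insert]; simp
      · left; exact h
    · right
      rw [PySem.Dict.get?_insert]
      split_ifs <;> simp [h]

theorem pvScan_correct (s : List Char) :
    ∀ (rest : List Char) (k : Nat) (stack : List Nat) (b e : Bool)
      (memo : PySem.Dict Nat (Option Nat)),
    s.drop k = rest → (b = false → e = false) →
    pvPending s rest k b e stack → pvGoodM s memo →
    pvGoodM s (pvScanLoop rest k stack b e memo) ∧
      ∀ p, (p ∈ stack ∨ (memo.get? p).isSome) →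
        ((pvScanLoop rest k stack b e memo).get? p).isSome := by
  intro rest
  induction rest with
  | nil =>
    intro k stack b e memo _ _ hp hg
    have hcl : ∀ p ∈ stack.reverse, pvCloseA s p = none := by
      intro p hpmem
      rw [List.mem_reverse] at hpmem
      rcases List.mem_iff_getElem.mp hpmem with ⟨r, hr, hrfl⟩
      have := hp r hr
      rw [hrfl] at this
      simpa [pvRun] using this
    have := pvFoldl_insert_none s stack.reverse memo hcl hg
    refine ⟨by simpa [pvScanLoop] using this.1, ?_⟩
    intro p hpm
    simp only [pvScanLoop]
    apply this.2
    rcases hpm with h | h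
    · left; simpa using h
    · right; exact h
  | cons c cs ih =>
    intro k stack b e memo hs hbe hp hg
    have hs' : s.drop (k + 1) = cs := pvDrop_succ hs
    cases b with
    | true =>
      cases e with
      | true =>
        rw [show pvScanLoop (c :: cs) k stack true true memo
            = pvScanLoop cs (k+1) stack true false memo from by simp [pvScanLoop]]
        refine ih (k+1) stack true false memo hs' (fun _ => rfl) ?_ hg
        intro r hr
        rw [hp r hr, show ∀ d, pvRun (c :: cs) k d true true = pvRun cs (k+1) d true false
          from fun d => by simp [pvRun]]
      | false =>
        by_cases h1 : c = '\\'
        · rw [show pvScanLoop (c :: cs) k stack true false memo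
              = pvScanLoop cs (k+1) stack true true memo from by simp [pvScanLoop, h1]]
          refine ih (k+1) stack true true memo hs' (fun h => h) ?_ hg
          intro r hr
          rw [hp r hr, show ∀ d, pvRun (c :: cs) k d true false = pvRun cs (k+1) d true true
            from fun d => by simp [pvRun, h1]]
        · by_cases h2 : c = '"'
          · rw [show pvScanLoop (c :: cs) k stack true false memo
                = pvScanLoop cs (k+1) stack false false memo from by simp [pvScanLoop, h1, h2]]
            refine ih (k+1) stack false false memo hs' (fun _ => rfl) ?_ hg
            intro r hr
            rw [hp r hr, show ∀ d, pvRun (c :: cs) k d true false = pvRun cs (k+1) d false false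
              from fun d => by simp [pvRun, h1, h2]]
          · rw [show pvScanLoop (c :: cs) k stack true false memo
                = pvScanLoop cs (k+1) stack true false memo from by simp [pvScanLoop, h1, h2]]
            refine ih (k+1) stack true false memo hs' (fun _ => rfl) ?_ hg
            intro r hr
            rw [hp r hr, show ∀ d, pvRun (c :: cs) k d true false = pvRun cs (k+1) d true false
              from fun d => by simp [pvRun, h1, h2]]
    | false =>
      have he : e = false := hbe rfl
      subst he
      by_cases h2 : c = '"'
      · rw [show pvScanLoop (c :: cs) k stack false false memo
            = pvScanLoop cs (k+1) stack true false memo from by simp [pvScanLoop, h2]]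
        refine ih (k+1) stack true false memo hs' (fun _ => rfl) ?_ hg
        intro r hr
        rw [hp r hr, show ∀ d, pvRun (c :: cs) k d false false = pvRun cs (k+1) d true false
          from fun d => by simp [pvRun, h2]]
      · by_cases h3 : c = '{'
        · rw [show pvScanLoop (c :: cs) k stack false false memo
              = pvScanLoop cs (k+1) (k :: stack) false false memo from by simp [pvScanLoop, h2, h3]]
          have hrun : ∀ d, pvRun (c :: cs) k d false false = pvRun cs (k+1) (d+1) false false :=
            fun d => by simp [pvRun, h2, h3]
          have hpend : pvPending s cs (k+1) false false (k :: stack) := by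
            intro r hr
            rcases r with _ | r
            · simp only [List.getElem_cons_zero]
              rw [pvCloseA, hs']
              norm_num
            · simp only [List.getElem_cons_succ]
              have hr' : r < stack.length := by simpa using hr
              have hd : ((r : Int) + 1) + 1 = (((r+1 : Nat)) : Int) + 1 := by push_cast; ring
              rw [hp r hr', hrun, hd]
          have hih := ih (k+1) (k :: stack) false false memo hs' (fun _ => rfl) hpend hg
          refine ⟨hih.1, ?_⟩
          intro p hp'
          apply hih.2
          rcases hp' with h | h
          · exact Or.inl (List.mem_cons_of_mem _ h)
          · exact Or.inr h
        · by_cases h4 : c = '}'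
          · rcases stack with _ | ⟨p, stack'⟩
            · rw [show pvScanLoop (c :: cs) k [] false false memo
                  = pvScanLoop cs (k+1) [] false false memo from by simp [pvScanLoop, h2, h3, h4]]
              refine ih (k+1) [] false false memo hs' (fun _ => rfl) ?_ hg
              intro r hr
              simp at hr
            · have hclose : pvCloseA s p = some k := by
                have h0 := hp 0 (by simp)
                simp only [List.getElem_cons_zero] at h0
                rw [h0]
                simp [pvRun, h2, h3, h4]
              have hg' : pvGoodM s (memo.insert p (some k)) := by
                intro q v hqv
                rw [PySem.Dict.get?_insert] at hqv
                split_ifs at hqv with hqp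
                · cases hqv; rw [hqp]; exact hclose.symm
                · exact hg q v hqv
              by_cases h5 : stack' = []
              · rw [show pvScanLoop (c :: cs) k (p :: stack') false false memo
                    = memo.insert p (some k) from by simp [pvScanLoop, h2, h3, h4, h5]]
                refine ⟨hg', ?_⟩
                intro q hq
                rw [PySem.Dict.get?_insert]
                split_ifs with hqp
                · simp
                · rcases hq with h | h
                  · subst h5
                    simp [hqp] at h
                  · exact h
              · rw [show pvScanLoop (c :: cs) k (p :: stack') false false memo
                    = pvScanLoop cs (k+1) stack' false false (memo.insert p (some k))
                    from by simp [pvScanLoop, h2, h3, h4, h5]]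
                have hrun : ∀ d : Int, d - 1 ≠ 0 → pvRun (c :: cs) k d false false
                    = pvRun cs (k+1) (d-1) false false :=
                  fun d hd => by simp [pvRun, h2, h3, h4, hd]
                have hpend' : pvPending s cs (k+1) false false stack' := by
                  intro r hr
                  have hstep := hp (r+1) (by simpa using Nat.succ_lt_succ hr)
                  simp only [List.getElem_cons_succ] at hstep
                  have hd : (((r+1 : Nat)) : Int) + 1 - 1 = (r : Int) + 1 := by push_cast; ring
                  rw [hstep, hrun _ (by push_cast; omega), hd]
                have hih := ih (k+1) stack' false false (memo.insert p (some k)) hs' (fun _ => rfl) hpend' hg'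
                refine ⟨hih.1, ?_⟩
                intro q hq
                apply hih.2
                rcases hq with h | h
                · rcases List.mem_cons.mp h with h | h
                  · right
                    rw [h, PySem.Dict.get?_insert]
                    simp
                  · left; exact h
                · right
                  rw [PySem.Dict.get?_insert]
                  split_ifs <;> simp [h]
          · rw [show pvScanLoop (c :: cs) k stack false false memo
                = pvScanLoop cs (k+1) stack false false memo from by simp [pvScanLoop, h2, h3, h4]]
            refine ih (k+1) stack false false memo hs' (fun _ => rfl) ?_ hg
            intro r hr
            rw [hp r hr, show ∀ d, pvRun (c :: cs) k d false false = pvRun cs (k+1) d false false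
              from fun d => by simp [pvRun, h2, h3, h4]]

theorem pvFrag_eq (s : List Char) :
    ∀ (rest : List Char) (i : Nat) (out : List String) (seen : PySem.Set String)
      (memo : PySem.Dict Nat (Option Nat)),
    s.drop i = rest → pvGoodM s memo →
    pvFragLoopA s rest i out seen = pvFragLoopB s rest i out seen memo := by
  intro rest
  induction rest with
  | nil => intro i out seen memo _ _; simp [pvFragLoopA, pvFragLoopB]
  | cons c cs ih =>
    intro i out seen memo hs hg
    have hs' : s.drop (i + 1) = cs := pvDrop_succ hs
    by_cases hc : c = '{'
    · subst hc
      simp only [pvFragLoopA, pvFragLoopB]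
      rw [if_neg (fun h => h rfl), if_neg (fun h => h rfl)]
      -- establish the memo after the conditional scan
      set memo' := if memo.contains i then memo else pvScanLoop (List.drop i s) i [] false false memo with hmemo'
      have hkey : pvGoodM s memo' ∧ ((memo'.get? i).isSome) := by
        rw [hmemo']
        split_ifs with hcont
        · refine ⟨hg, ?_⟩
          rw [← PySem.Dict.contains_eq_isSome_get?]
          exact hcont
        · rw [hs]
          rw [show pvScanLoop ('{' :: cs) i [] false false memo
              = pvScanLoop cs (i+1) [i] false false memo from by simp [pvScanLoop]]
          have hpend : pvPending s cs (i+1) false false [i] := by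
            intro r hr
            have hr0 : r = 0 := by simpa using hr
            subst hr0
            simp only [List.getElem_cons_zero]
            rw [pvCloseA, hs']
            norm_num
          have := pvScan_correct s cs (i+1) [i] false false memo hs' (by simp) hpend hg
          exact ⟨this.1, this.2 i (by simp)⟩
      obtain ⟨hg', hsome⟩ := hkey
      obtain ⟨v, hv⟩ := Option.isSome_iff_exists.mp hsome
      have hvclose : v = pvCloseA s i := hg' i v hv
      have hdropi : List.drop i s = '{' :: cs := hs
      have hextr := pvExtract_eq cs
      have hcloseshift : pvCloseA s i = (pvRun cs 1 1 false false).map (· + i) := by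
        rw [pvCloseA, hs', pvRun_shift cs (i+1), pvRun_shift cs 1, Option.map_map]
        apply congrFun
        apply congrArg
        funext m
        simp [Function.comp]
        omega
      rw [hdropi, hextr, hv]
      cases hrun : pvRun cs 1 1 false false with
      | none =>
        have : v = none := by rw [hvclose, hcloseshift, hrun]; rfl
        subst this
        simp only [Option.map_none]
        exact ih (i+1) out seen memo' hs' hg'
      | some m =>
        have hvv : v = some (m + i) := by rw [hvclose, hcloseshift, hrun]; rfl
        subst hvv
        simp only [Option.map_some]
        have hfragne : String.ofList (List.take (m + 1) ('{' :: cs)) ≠ "" := by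
          intro h
          have := congrArg String.toList h
          simp at this
        rw [if_neg hfragne]
        rw [show m + i + 1 - i = m + 1 from by omega]
        set key := PySem.Str.strip (String.ofList (List.take (m + 1) ('{' :: cs))) with hk
        by_cases hk1 : key = ""
        · simp only [if_pos hk1]
          exact ih (i+1) out seen memo' hs' hg'
        · simp only [if_neg hk1]
          by_cases hk2 : PySem.Set.contains seen key = true
          · simp only [if_pos hk2]
            exact ih (i+1) out seen memo' hs' hg'
          · simp only [if_neg hk2]
            exact ih (i+1) (out ++ [key]) (PySem.Set.add seen key) memo' hs' hg'
    · simp only [pvFragLoopA, pvFragLoopB, if_pos hc]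
      exact ih (i+1) out seen memo hs' hg

-- ===== VERDICT (by name: the statement is the Claim_ definition above) =====
theorem json_object_fragments_py_spec : Claim_equal_json_object_fragments_py := by
  intro text _
  unfold Spec_json_object_fragments_py json_object_fragments_py json_object_fragments_py_alt
  have hor : (if text = "" then "" else text) = text := by split_ifs with h <;> simp [h]
  rw [hor]
  exact pvFrag_eq text.toList text.toList 0 [] PySem.Set.empty PySem.Dict.empty rfl
    (fun p v hv => by simp [PySem.Dict.get?_empty] at hv)
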